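-- pv_equiv track=rewrite | github.com/jramaswami/Binary_Search_Python | a_maniacal_walk.py | solve
-- ===== SOURCE A (Python) =====
-- def solve(length, N):
--     MOD = pow(10, 9) + 7
--     dp = [[0 for _ in range(length)] for _ in range(N+1)]
--     dp[0][0] = 1
--     for r, _ in enumerate(dp[1:], start=1):
--         for c, _ in enumerate(dp[r]):
--             # Move right
--             if c - 1 >= 0:
--                 dp[r][c] = (dp[r][c] + dp[r-1][c-1]) % MOD
--
--             # Stay
--             dp[r][c] = (dp[r][c] + dp[r-1][c]) % MOD
--
--             # Move left
--             if c + 1 < len(dp[r]):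
--                 dp[r][c] = (dp[r][c] + dp[r-1][c+1]) % MOD
--
--     return dp[-1][0]
-- ===== SOURCE B (Python) =====
-- def solve(length, N):
--     MOD = pow(10, 9) + 7
--     W = 64
--     B = 1 << W
--     # one multiplication by C adds the left and right neighbour counts to every cell:
--     # limb j of (row * C) >> W  is  row[j-1] + row[j] + row[j+1]
--     C = 1 + (1 << W) + (1 << (2 * W))
--     mask = (1 << (W * length)) - 1
--     row = 1  # limb j of `row` holds the walk count ending at cell j; start = e_0
--     steps = 0
--     while steps < N:
--         # 3**20 * MOD < 2**64, so limbs cannot overflow within 20 unreduced steps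
--         t = min(20, N - steps)
--         for _ in range(t):
--             row = ((row * C) >> W) & mask
--         # reduce every limb mod MOD, then repack
--         data = row.to_bytes(8 * length, "little")
--         row = int.from_bytes(
--             b"".join(
--                 (int.from_bytes(data[8 * j:8 * j + 8], "little") % MOD).to_bytes(8, "little")
--                 for j in range(length)
--             ),
--             "little",
--         )
--         steps += t
--     return row & (B - 1)
-- ===== Notes on version B (the rewrite author's own statement) =====
-- stated objective: alternative
-- what changed: B drops A's (N+1) x length DP table of per-cell guarded updates and instead packs the whole row into one big integer with 64-bit limbs, so each DP step is a single multiplication by 1+2^64+2^128 (plus shift/mask), with a per-limb mod-1e9+7 reduction only every 20 steps (3^20*MOD < 2^64 rules out limb overflow).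
import Mathlib
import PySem

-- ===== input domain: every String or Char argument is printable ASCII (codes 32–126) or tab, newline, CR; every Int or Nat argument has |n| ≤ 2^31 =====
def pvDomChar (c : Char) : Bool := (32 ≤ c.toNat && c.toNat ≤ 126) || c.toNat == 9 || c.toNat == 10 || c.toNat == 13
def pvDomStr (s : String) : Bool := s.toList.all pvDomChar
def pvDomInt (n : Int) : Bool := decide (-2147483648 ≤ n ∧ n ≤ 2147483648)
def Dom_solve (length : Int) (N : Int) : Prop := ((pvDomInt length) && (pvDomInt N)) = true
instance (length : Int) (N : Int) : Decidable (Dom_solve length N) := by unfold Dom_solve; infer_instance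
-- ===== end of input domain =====

-- B replaces A's cell-by-cell (N+1)×length DP table with one big integer packing the whole
-- row in 64-bit limbs: one multiplication by 1+2^64+2^128 performs a whole DP step (it adds
-- both neighbour counts to every cell at once), with a per-limb mod reduction every 20 steps.


-- ===== PORT A =====
-- literal port of A's double loop over a (N+1)×length table; Python lists with in-place
-- item assignment are ported as Arrays with in-place modify (dp[r][c] = dp[r][c] + x  ↦
-- dp.modify r (row.modify c ...)); loop indices are the nonnegative Python loop indices,
-- kept as Nat (so 'c - 1 >= 0' reads '1 ≤ c'); dp[-1] is PySem.List.pyGetD at -1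
def solve (length : Int) (N : Int) : Int :=
  let MOD : Int := 10 ^ 9 + 7
  let dp : Array (Array Int) :=
    ((List.range (N + 1).toNat).map (fun _ =>
      ((List.range length.toNat).map (fun _ => (0 : Int))).toArray)).toArray
  let dp := dp.modify 0 (fun row => row.modify 0 (fun _ => 1))
  let dp := (List.range (dp.size - 1)).foldl (fun (dp : Array (Array Int)) i =>
    let r := i + 1
    (List.range (dp.getD r (#[] : Array Int)).size).foldl (fun (dp : Array (Array Int)) c =>
      -- Move right
      let dp := if 1 ≤ c then
          let prev := (dp.getD (r - 1) (#[] : Array Int)).getD (c - 1) 0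
          dp.modify r (fun row => row.modify c (fun old => (old + prev) % MOD))
        else dp
      -- Stay
      let dp :=
          let prev := (dp.getD (r - 1) (#[] : Array Int)).getD c 0
          dp.modify r (fun row => row.modify c (fun old => (old + prev) % MOD))
      -- Move left
      let dp := if c + 1 < (dp.getD r (#[] : Array Int)).size then
          let prev := (dp.getD (r - 1) (#[] : Array Int)).getD (c + 1) 0
          dp.modify r (fun row => row.modify c (fun old => (old + prev) % MOD))
        else dp
      dp) dp) dp
  (PySem.List.pyGetD (dp.toList.map Array.toList) (-1) []).getD 0 0

-- ===== PORT B =====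
-- Source B's while loop ('while steps < N', 'steps += t') as recursion on rem = N - steps.
-- Python's W=64, B=2**64, C=1+2**64+2**128, mask=2**(64*L)-1 are inlined:
-- on these nonnegative ints, (x * C) >> W == x * C / 2^64 and x & mask == x % 2^(64*L);
-- row.to_bytes / from_bytes limb j == row / 2^(64*j) % 2^64, and the b"".join repack
-- is the base-2^64 fold below.
-- one loop iteration 'row = ((row * C) >> W) & mask'
def stepB (L : ℕ) (r : ℕ) : ℕ := r * (1 + 2 ^ 64 + 2 ^ 128) / 2 ^ 64 % 2 ^ (64 * L)
-- hand port of Source B's row.to_bytes(8*L,'little') read back as 64-bit words: the list of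
-- base-2^64 digits of row (exact: digit j = row >> 64j & (B-1); computed by binary
-- splitting so that evaluation is near-linear — proved equal to digit extraction below)
def limbsDC (L : ℕ) (x : ℕ) : List ℕ :=
  if L = 0 then []
  else if L = 1 then [x % 2 ^ 64]
  else
    let h := L / 2
    limbsDC h (x % 2 ^ (64 * h)) ++ limbsDC (L - h) (x / 2 ^ (64 * h))
  termination_by L
  decreasing_by all_goals omega
-- hand port of b"".join(limb.to_bytes(8,'little')) + int.from_bytes: the base-2^64 value
-- of a limb list (again by binary splitting)
def packDC (v : List ℕ) : ℕ :=
  if v.length ≤ 1 then v.headD 0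
  else
    let h := v.length / 2
    packDC (v.take h) + 2 ^ (64 * h) * packDC (v.drop h)
  termination_by v.length
  decreasing_by all_goals simp [List.length_take, List.length_drop]; omega
-- the per-limb reduction: unpack, % MOD each limb, repack
def redB (L : ℕ) (row : ℕ) : ℕ :=
  packDC ((limbsDC L row).map (fun a => a % (10 ^ 9 + 7)))
def loopB (L : ℕ) (rem : ℕ) (row : ℕ) : ℕ :=
  if _h : rem = 0 then row
  else
    let t := min 20 rem
    loopB L (rem - t) (redB L ((List.range t).foldl (fun r _ => stepB L r) row))
  termination_by rem
  decreasing_by omega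

-- port of Source B: the packed row starts as the integer 1 (= e_0); the final 'row & (B-1)'
-- is '% 2^64'; Python's while loop does nothing for N ≤ 0, so rem = N.toNat is exact
def solve_alt (length : Int) (N : Int) : Int :=
  ((loopB length.toNat N.toNat 1 % 2 ^ 64 : ℕ) : Int)

-- ===== PRECONDITION & SPEC =====
-- Pre_ excludes exactly the inputs where A raises IndexError: length ≤ 0 (empty rows,
-- dp[0][0]=1 fails) or N < 0 (no rows, dp[0][0]=1 fails).
def Pre_solve (length : Int) (N : Int) : Prop := 1 ≤ length ∧ 0 ≤ N
instance (length : Int) (N : Int) : Decidable (Pre_solve length N) := by unfold Pre_solve; infer_instance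
def pvWitness_solve : Int × Int := (3, 4)

def Spec_solve (length : Int) (N : Int) (out : Int) : Prop := out = solve_alt length N
instance (length : Int) (N : Int) (out : Int) : Decidable (Spec_solve length N out) := by unfold Spec_solve; infer_instance

-- ===== CLAIM (what is proved, stated in full; the proofs are below) =====
def Claim_equal_solve : Prop := ∀ (length : Int) (N : Int), Dom_solve length N → Pre_solve length N → Spec_solve length N (solve length N)

-- ===== LEMMAS AND PROOFS =====

-- ---------- A-side: the DP computes rowsA ----------

-- A's inner-loop cell value: what one pass of the inner loop writes into cell c,
-- reading row v = dp[r-1]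
def stepVal (L : ℕ) (v : List Int) (c : ℕ) : Int :=
  let a := if 1 ≤ c then (0 + v.getD (c - 1) 0) % (1000000007 : Int) else 0
  let b := (a + v.getD c 0) % (1000000007 : Int)
  if c + 1 < L then (b + v.getD (c + 1) 0) % (1000000007 : Int) else b

def stepRow (L : ℕ) (v : List Int) : List Int := (List.range L).map (stepVal L v)

def rowsA (L : ℕ) : ℕ → List Int
  | 0 => (List.replicate L (0 : Int)).set 0 1
  | r + 1 => stepRow L (rowsA L r)

theorem getD_map_range' {α : Type} (n k : ℕ) (f : ℕ → α) (d : α) (h : k < n) :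
    ((List.range n).map f).getD k d = f k := by simp [List.getD, h]

theorem set_map_range {α : Type} (n i : ℕ) (x : α) (g : ℕ → α) :
    (((List.range n).map g).set i x) = (List.range n).map (fun r => if r = i then x else g r) := by
  apply List.ext_getElem
  · simp
  · intro j h1 h2
    rcases eq_or_ne j i with rfl | hne
    · simp at h2; simp
    · simp [List.getElem_set_ne (Ne.symm hne), hne]

-- named copies of A's loop bodies (definitionally equal to the lambdas in `solve`)
def upd (MOD : Int) (r : ℕ) (dp : List (List Int)) (c src : ℕ) : List (List Int) :=
  dp.set r ((dp.getD r []).set c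
    (((dp.getD r []).getD c 0 + (dp.getD (r - 1) []).getD src 0) % MOD))

def innerF (MOD : Int) (r : ℕ) (dp : List (List Int)) (c : ℕ) : List (List Int) :=
  let dp := if 1 ≤ c then upd MOD r dp c (c - 1) else dp
  let dp := upd MOD r dp c c
  let dp := if c + 1 < (dp.getD r []).length then upd MOD r dp c (c + 1) else dp
  dp

def outerF (MOD : Int) (dp : List (List Int)) (i : ℕ) : List (List Int) :=
  let r := i + 1
  (List.range (dp.getD r []).length).foldl (innerF MOD r) dp

-- named copies of the ARRAY loop bodies of the port `solve` (definitionally equal)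
def innerA (MOD : Int) (r : ℕ) (dp : Array (Array Int)) (c : ℕ) : Array (Array Int) :=
  let dp := if 1 ≤ c then
      let prev := (dp.getD (r - 1) (#[] : Array Int)).getD (c - 1) 0
      dp.modify r (fun row => row.modify c (fun old => (old + prev) % MOD))
    else dp
  let dp :=
      let prev := (dp.getD (r - 1) (#[] : Array Int)).getD c 0
      dp.modify r (fun row => row.modify c (fun old => (old + prev) % MOD))
  let dp := if c + 1 < (dp.getD r (#[] : Array Int)).size then
      let prev := (dp.getD (r - 1) (#[] : Array Int)).getD (c + 1) 0
      dp.modify r (fun row => row.modify c (fun old => (old + prev) % MOD))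
    else dp
  dp

def outerA (MOD : Int) (dp : Array (Array Int)) (i : ℕ) : Array (Array Int) :=
  let r := i + 1
  (List.range (dp.getD r (#[] : Array Int)).size).foldl (innerA MOD r) dp

-- the list view of the array table: the port's state seen by the list-level lemmas
def phiA (dp : Array (Array Int)) : List (List Int) := dp.toList.map Array.toList

theorem modify_eq_set_getD {α : Type} (l : List α) (i : ℕ) (f : α → α) (d : α) :
    l.modify i f = l.set i (f (l.getD i d)) := by
  induction l generalizing i with
  | nil => simp
  | cons a l ih =>
    cases i with
    | zero => simp [List.getD]
    | succ i =>
      simp only [List.modify_succ_cons, List.set_cons_succ, List.getD_cons_succ]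
      rw [ih]

theorem map_modify {α β : Type} (g : α → β) (f : α → α) (f' : β → β)
    (hc : ∀ a, g (f a) = f' (g a)) :
    ∀ (l : List α) (i : ℕ), (l.modify i f).map g = (l.map g).modify i f' := by
  intro l
  induction l with
  | nil => intro i; simp
  | cons a l ih =>
    intro i
    cases i with
    | zero => simp [hc]
    | succ i => simp [ih]

theorem arr_getD {α : Type} (a : Array α) (i : ℕ) (d : α) : a.getD i d = a.toList.getD i d := by
  unfold Array.getD
  split
  · rw [List.getD_eq_getElem _ _ (by simpa using ‹_›)]
    simp
  · rw [List.getD_eq_default _ _ (by simp; omega)]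

theorem phiA_getD (dp : Array (Array Int)) (r : ℕ) :
    (dp.getD r (#[] : Array Int)).toList = (phiA dp).getD r [] := by
  rw [arr_getD]
  unfold phiA
  by_cases h : r < dp.toList.length
  · rw [List.getD_eq_getElem _ _ h, List.getD_eq_getElem _ _ (by simpa using h), List.getElem_map]
  · rw [List.getD_eq_default _ _ (by omega), List.getD_eq_default _ _ (by simpa using h)]

theorem phiA_size (dp : Array (Array Int)) (r : ℕ) :
    (dp.getD r (#[] : Array Int)).size = ((phiA dp).getD r []).length := by
  rw [← phiA_getD]
  simp

theorem phiA_scalar (dp : Array (Array Int)) (r src : ℕ) :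
    (dp.getD r (#[] : Array Int)).getD src 0 = ((phiA dp).getD r []).getD src 0 := by
  rw [arr_getD, phiA_getD]

theorem phiA_modify (MOD prev : Int) (dp : Array (Array Int)) (r c : ℕ) :
    phiA (dp.modify r (fun row => row.modify c (fun old => (old + prev) % MOD)))
      = (phiA dp).set r (((phiA dp).getD r []).set c
          ((((phiA dp).getD r []).getD c 0 + prev) % MOD)) := by
  show (dp.modify r _).toList.map Array.toList = _
  rw [Array.toList_modify]
  rw [map_modify Array.toList _ (fun lrow => lrow.modify c (fun old => (old + prev) % MOD))
      (fun a => by rw [Array.toList_modify]) dp.toList r]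
  rw [modify_eq_set_getD _ _ _ ([] : List Int)]
  rw [modify_eq_set_getD _ _ _ (0 : Int)]
  rfl

theorem phiA_upd (MOD : Int) (r c src : ℕ) (dp : Array (Array Int)) :
    phiA (dp.modify r (fun row => row.modify c (fun old =>
        (old + (dp.getD (r - 1) (#[] : Array Int)).getD src 0) % MOD)))
      = upd MOD r (phiA dp) c src := by
  rw [phiA_scalar, phiA_modify]
  rfl

theorem phiA_inner (MOD : Int) (r : ℕ) (dp : Array (Array Int)) (c : ℕ) :
    phiA (innerA MOD r dp c) = innerF MOD r (phiA dp) c := by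
  have hC1 : ∀ dp : Array (Array Int),
      phiA (if 1 ≤ c then dp.modify r (fun row => row.modify c (fun old =>
          (old + (dp.getD (r - 1) (#[] : Array Int)).getD (c - 1) 0) % MOD)) else dp)
        = if 1 ≤ c then upd MOD r (phiA dp) c (c - 1) else phiA dp := by
    intro dp
    split
    · exact phiA_upd MOD r c (c - 1) dp
    · rfl
  have hC3 : ∀ dp : Array (Array Int),
      phiA (if c + 1 < (dp.getD r (#[] : Array Int)).size then
          dp.modify r (fun row => row.modify c (fun old =>
            (old + (dp.getD (r - 1) (#[] : Array Int)).getD (c + 1) 0) % MOD)) else dp)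
        = if c + 1 < ((phiA dp).getD r []).length then upd MOD r (phiA dp) c (c + 1) else phiA dp := by
    intro dp
    rw [phiA_size dp r]
    split
    · exact phiA_upd MOD r c (c + 1) dp
    · rfl
  unfold innerA innerF
  dsimp only
  rw [hC3, phiA_upd MOD r c c, hC1]

theorem phiA_innerfold (MOD : Int) (r : ℕ) (l : List ℕ) :
    ∀ dp : Array (Array Int),
      phiA (l.foldl (innerA MOD r) dp) = l.foldl (innerF MOD r) (phiA dp) := by
  induction l with
  | nil => intro dp; rfl
  | cons a l ih =>
    intro dp
    rw [List.foldl_cons, List.foldl_cons, ih, phiA_inner]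

theorem phiA_outer (MOD : Int) (dp : Array (Array Int)) (i : ℕ) :
    phiA (outerA MOD dp i) = outerF MOD (phiA dp) i := by
  unfold outerA outerF
  dsimp only
  rw [phiA_size dp (i + 1), phiA_innerfold]

theorem phiA_fold (MOD : Int) (l : List ℕ) :
    ∀ dp : Array (Array Int),
      phiA (l.foldl (outerA MOD) dp) = l.foldl (outerF MOD) (phiA dp) := by
  induction l with
  | nil => intro dp; rfl
  | cons a l ih =>
    intro dp
    rw [List.foldl_cons, List.foldl_cons, ih, phiA_outer]

theorem phiA_modify_one (dp : Array (Array Int)) :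
    phiA (dp.modify 0 (fun row => row.modify 0 (fun _ => 1)))
      = (phiA dp).set 0 (((phiA dp).getD 0 []).set 0 1) := by
  show (dp.modify 0 _).toList.map Array.toList = _
  rw [Array.toList_modify,
      map_modify Array.toList _ (fun lrow => lrow.modify 0 (fun _ => (1 : Int)))
        (fun a => by rw [Array.toList_modify]) dp.toList 0,
      modify_eq_set_getD _ _ _ ([] : List Int), modify_eq_set_getD _ _ _ (0 : Int)]
  rfl

theorem phiA_init (n L : ℕ) :
    phiA (((List.range n).map (fun _ => ((List.range L).map (fun _ => (0 : Int))).toArray)).toArray)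
      = (List.range n).map (fun _ => (List.range L).map (fun _ => (0 : Int))) := by
  simp [phiA]

-- the DP table after the first k outer iterations, with `row` sitting in slot k+1
def dpSt (L n k : ℕ) (row : List Int) : List (List Int) :=
  (List.range (n + 1)).map (fun r => if r ≤ k then rowsA L r else if r = k + 1 then row else List.replicate L 0)

-- row k+1 after the first c inner iterations
def partRow (L k c : ℕ) : List Int :=
  (List.range L).map (fun j => if j < c then stepVal L (rowsA L k) j else 0)

theorem getD_set_self (l : List Int) (c : ℕ) (x : Int) (h : c < l.length) :
    (l.set c x).getD c 0 = x := by
  simp [List.getD, List.getElem?_set_self (by simpa using h)]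

theorem getD_dpSt_succ (L n k : ℕ) (row : List Int) (h : k + 1 ≤ n) :
    (dpSt L n k row).getD (k + 1) [] = row := by
  unfold dpSt
  rw [getD_map_range' _ _ _ _ (by omega), if_neg (by omega), if_pos rfl]

theorem getD_dpSt_self (L n k : ℕ) (row : List Int) (h : k ≤ n) :
    (dpSt L n k row).getD k [] = rowsA L k := by
  unfold dpSt
  rw [getD_map_range' _ _ _ _ (by omega), if_pos le_rfl]

theorem set_dpSt (L n k : ℕ) (row row' : List Int) :
    (dpSt L n k row).set (k + 1) row' = dpSt L n k row' := by
  unfold dpSt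
  rw [set_map_range]
  refine List.map_congr_left (fun r _ => ?_)
  rcases eq_or_ne r (k + 1) with rfl | h
  · rw [if_pos rfl, if_neg (by omega), if_pos rfl]
  · rw [if_neg h]
    by_cases h2 : r ≤ k
    · rw [if_pos h2, if_pos h2]
    · rw [if_neg h2, if_neg h2, if_neg h, if_neg h]

theorem length_partRow (L k c : ℕ) : (partRow L k c).length = L := by simp [partRow]

theorem partRow_zero (L k : ℕ) : partRow L k 0 = List.replicate L 0 := by
  simp [partRow]

theorem getD_partRow (L k c j : ℕ) (hj : j < L) :
    (partRow L k c).getD j 0 = if j < c then stepVal L (rowsA L k) j else 0 := by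
  unfold partRow
  rw [getD_map_range' _ _ _ _ hj]

theorem partRow_set (L k c : ℕ) :
    (partRow L k c).set c (stepVal L (rowsA L k) c) = partRow L k (c + 1) := by
  unfold partRow
  rw [set_map_range]
  refine List.map_congr_left (fun j _ => ?_)
  rcases eq_or_ne j c with rfl | h
  · rw [if_pos rfl, if_pos (by omega)]
  · rw [if_neg h]
    congr 1
    simp only [eq_iff_iff]
    omega

theorem partRow_full (L k : ℕ) : partRow L k L = stepRow L (rowsA L k) := by
  unfold partRow stepRow
  refine List.map_congr_left (fun j hj => ?_)
  rw [if_pos (by simpa using List.mem_range.mp hj)]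

theorem dpSt_succ (L n k : ℕ) (_h : k + 1 ≤ n) :
    dpSt L n k (rowsA L (k + 1)) = dpSt L n (k + 1) (List.replicate L 0) := by
  unfold dpSt
  refine List.map_congr_left (fun r _ => ?_)
  by_cases h1 : r ≤ k
  · rw [if_pos h1, if_pos (show r ≤ k + 1 by omega)]
  · rcases eq_or_ne r (k + 1) with h2 | h2
    · rw [if_neg h1, if_pos h2, if_pos (show r ≤ k + 1 by omega), h2]
    · rw [if_neg h1, if_neg h2, if_neg (show ¬ r ≤ k + 1 by omega), ite_self]

theorem upd_dpSt (L n k c src : ℕ) (row : List Int) (hk : k + 1 ≤ n) :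
    upd 1000000007 (k + 1) (dpSt L n k row) c src
      = dpSt L n k (row.set c ((row.getD c 0 + (rowsA L k).getD src 0) % 1000000007)) := by
  unfold upd
  rw [show k + 1 - 1 = k by omega, getD_dpSt_succ _ _ _ _ hk,
    getD_dpSt_self _ _ _ _ (by omega), set_dpSt]

theorem innerF_step (L n k c : ℕ) (hk : k + 1 ≤ n) (hc : c < L) :
    innerF 1000000007 (k + 1) (dpSt L n k (partRow L k c)) c = dpSt L n k (partRow L k (c + 1)) := by
  have hcc : (partRow L k c).getD c 0 = 0 := by
    rw [getD_partRow _ _ _ _ hc, if_neg (by omega)]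
  have hlen : (partRow L k c).length = L := length_partRow L k c
  unfold innerF
  dsimp only
  by_cases h1 : 1 ≤ c
  · rw [if_pos h1, upd_dpSt _ _ _ _ _ _ hk, hcc, upd_dpSt _ _ _ _ _ _ hk,
      getD_set_self _ _ _ (by rw [hlen]; exact hc), List.set_set,
      getD_dpSt_succ _ _ _ _ hk, List.length_set, hlen]
    by_cases h2 : c + 1 < L
    · rw [if_pos h2, upd_dpSt _ _ _ _ _ _ hk,
        getD_set_self _ _ _ (by rw [hlen]; exact hc), List.set_set]
      have hval : (((0 + (rowsA L k).getD (c - 1) 0) % 1000000007 + (rowsA L k).getD c 0) % 1000000007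
            + (rowsA L k).getD (c + 1) 0) % 1000000007 = stepVal L (rowsA L k) c := by
        unfold stepVal
        dsimp only
        rw [if_pos h1, if_pos h2]
      rw [hval, partRow_set]
    · rw [if_neg h2]
      have hval : ((0 + (rowsA L k).getD (c - 1) 0) % 1000000007 + (rowsA L k).getD c 0) % 1000000007
            = stepVal L (rowsA L k) c := by
        unfold stepVal
        dsimp only
        rw [if_pos h1, if_neg h2]
      rw [hval, partRow_set]
  · rw [if_neg h1, upd_dpSt _ _ _ _ _ _ hk, hcc,
      getD_dpSt_succ _ _ _ _ hk, List.length_set, hlen]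
    by_cases h2 : c + 1 < L
    · rw [if_pos h2, upd_dpSt _ _ _ _ _ _ hk,
        getD_set_self _ _ _ (by rw [hlen]; exact hc), List.set_set]
      have hval : ((0 + (rowsA L k).getD c 0) % 1000000007 + (rowsA L k).getD (c + 1) 0) % 1000000007
            = stepVal L (rowsA L k) c := by
        unfold stepVal
        dsimp only
        rw [if_neg h1, if_pos h2]
      rw [hval, partRow_set]
    · rw [if_neg h2]
      have hval : (0 + (rowsA L k).getD c 0) % 1000000007 = stepVal L (rowsA L k) c := by
        unfold stepVal
        dsimp only
        rw [if_neg h1, if_neg h2]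
      rw [hval, partRow_set]

theorem inner_fold (L n k : ℕ) (hk : k + 1 ≤ n) :
    ∀ c, c ≤ L → (List.range c).foldl (innerF 1000000007 (k + 1)) (dpSt L n k (List.replicate L 0))
      = dpSt L n k (partRow L k c) := by
  intro c
  induction c with
  | zero => intro _; rw [List.range_zero, List.foldl_nil, partRow_zero]
  | succ c' ih =>
    intro hc
    rw [List.range_succ, List.foldl_append, ih (by omega), List.foldl_cons, List.foldl_nil]
    exact innerF_step L n k c' hk (by omega)

theorem outer_step (L n k : ℕ) (hk : k + 1 ≤ n) :
    outerF 1000000007 (dpSt L n k (List.replicate L 0)) k = dpSt L n (k + 1) (List.replicate L 0) := by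
  unfold outerF
  dsimp only
  rw [getD_dpSt_succ _ _ _ _ hk, List.length_replicate]
  rw [inner_fold L n k hk L le_rfl, partRow_full]
  have : stepRow L (rowsA L k) = rowsA L (k + 1) := rfl
  rw [this, dpSt_succ _ _ _ hk]

theorem outer_fold (L n : ℕ) :
    ∀ k, k ≤ n → (List.range k).foldl (outerF 1000000007) (dpSt L n 0 (List.replicate L 0))
      = dpSt L n k (List.replicate L 0) := by
  intro k
  induction k with
  | zero => intro _; rw [List.range_zero, List.foldl_nil]
  | succ k' ih =>
    intro hk
    rw [List.range_succ, List.foldl_append, ih (by omega), List.foldl_cons, List.foldl_nil]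
    exact outer_step L n k' hk

-- A's fold computes rowsA
theorem solve_eq_rows (length N : Int) (h1 : 1 ≤ length) (h2 : 0 ≤ N) :
    solve length N = (rowsA length.toNat N.toNat).getD 0 0 := by
  have hL : 0 < length.toNat := by omega
  have hn1 : (N + 1).toNat = N.toNat + 1 := by omega
  have hport : solve length N
      = (PySem.List.pyGetD (phiA ((List.range ((((List.range (N + 1).toNat).map
            (fun _ => ((List.range length.toNat).map (fun _ => (0 : Int))).toArray)).toArray.modify 0
              (fun row => row.modify 0 (fun _ => 1))).size - 1)).foldl (outerA (10 ^ 9 + 7))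
          (((List.range (N + 1).toNat).map
            (fun _ => ((List.range length.toNat).map (fun _ => (0 : Int))).toArray)).toArray.modify 0
              (fun row => row.modify 0 (fun _ => 1))))) (-1) []).getD 0 0 := rfl
  have hsz : (((List.range (N + 1).toNat).map
        (fun _ => ((List.range length.toNat).map (fun _ => (0 : Int))).toArray)).toArray.modify 0
          (fun row => row.modify 0 (fun _ => 1))).size
      = (((List.range (N + 1).toNat).map (fun _ => (List.range length.toNat).map (fun _ => (0 : Int)))).set 0
          ((((List.range (N + 1).toNat).map (fun _ => (List.range length.toNat).map (fun _ => (0 : Int)))).getD 0 []).set 0 1)).length := by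
    simp
  rw [hport, phiA_fold, phiA_modify_one, phiA_init, hsz]
  set L := length.toNat with hLdef
  set n := N.toNat with hndef
  rw [hn1]
  have hmod : (10 ^ 9 + 7 : Int) = 1000000007 := by norm_num
  rw [hmod]
  have hzrow : (List.range L).map (fun _ => (0 : Int)) = List.replicate L 0 := by simp
  have hdp0getD : ((List.range (n + 1)).map (fun _ => (List.range L).map (fun _ => (0 : Int)))).getD 0 []
      = List.replicate L 0 := by
    rw [getD_map_range' _ _ _ _ (by omega), hzrow]
  have hdp1 : ((List.range (n + 1)).map (fun _ => (List.range L).map (fun _ => (0 : Int)))).set 0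
      ((((List.range (n + 1)).map (fun _ => (List.range L).map (fun _ => (0 : Int)))).getD 0 []).set 0 1)
      = dpSt L n 0 (List.replicate L 0) := by
    rw [hdp0getD, set_map_range]
    unfold dpSt
    refine List.map_congr_left (fun r _ => ?_)
    rcases eq_or_ne r 0 with rfl | h
    · rw [if_pos rfl, if_pos le_rfl]
      rfl
    · rw [if_neg h, if_neg (by omega), hzrow]
      rcases eq_or_ne r 1 with rfl | h2
      · rw [if_pos rfl]
      · rw [if_neg h2]
  rw [hdp1]
  have hlen : (dpSt L n 0 (List.replicate L 0)).length = n + 1 := by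
    unfold dpSt
    simp
  rw [hlen]
  have : n + 1 - 1 = n := by omega
  rw [this, outer_fold L n n le_rfl]
  have hne : dpSt L n n (List.replicate L 0) ≠ [] := by
    unfold dpSt
    intro hcon
    have := congrArg List.length hcon
    simp at this
  rw [PySem.List.pyGetD_neg_one _ _ hne, List.getLast_eq_getElem]
  unfold dpSt
  have hlen2 : ((List.range (n + 1)).map (fun r => if r ≤ n then rowsA L r else if r = n + 1 then List.replicate L 0 else List.replicate L 0)).length = n + 1 := by
    simp
  simp only [hlen2]
  rw [List.getElem_map, List.getElem_range, if_pos (by omega)]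
  rfl

-- ---------- B-side: packed-integer arithmetic ----------

-- value of a list of 64-bit limbs, little-endian base 2^64
def pack : List ℕ → ℕ
  | [] => 0
  | a :: v => a + 2 ^ 64 * pack v

-- limb j of a packed integer
def limb (x j : ℕ) : ℕ := x / 2 ^ (64 * j) % 2 ^ 64

-- the limbs of row * (1+2^64+2^128): position j holds v_j + v_(j-1) + v_(j-2)
def wext (v : List ℕ) : List ℕ :=
  List.zipWith3 (fun x y z => x + y + z)
    (v ++ List.replicate 2 0) (0 :: (v ++ List.replicate 1 0)) (0 :: 0 :: v)

-- the next DP row as limbs: (wext v).tail, truncated to L cells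
def nextRow (L : ℕ) (v : List ℕ) : List ℕ := ((wext v).tail).take L

theorem stepVal_eq (L : ℕ) (v : List Int) (j : ℕ) :
    stepVal L v j = ((if j = 0 then 0 else v.getD (j - 1) 0) + v.getD j 0
      + (if j + 1 < L then v.getD (j + 1) 0 else 0)) % 1000000007 := by
  unfold stepVal
  dsimp only
  by_cases hj0 : 1 ≤ j
  · rw [if_pos hj0, if_neg (show ¬ j = 0 by omega)]
    by_cases hj1 : j + 1 < L
    · rw [if_pos hj1, if_pos hj1]
      omega
    · rw [if_neg hj1, if_neg hj1]
      omega
  · rw [if_neg hj0, if_pos (show j = 0 by omega)]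
    by_cases hj1 : j + 1 < L
    · rw [if_pos hj1, if_pos hj1]
      omega
    · rw [if_neg hj1, if_neg hj1]
      omega

theorem rowsA_length (L : ℕ) (r : ℕ) : (rowsA L r).length = L := by
  cases r with
  | zero => simp [rowsA]
  | succ r' => simp [rowsA, stepRow]

theorem length_zipWith3 {α β γ δ : Type} (f : α → β → γ → δ) (l1 : List α) (l2 : List β) (l3 : List γ) :
    (List.zipWith3 f l1 l2 l3).length = min (min l1.length l2.length) l3.length := by
  induction l1 generalizing l2 l3 with
  | nil => simp [List.zipWith3]
  | cons a as ih =>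
    cases l2 with
    | nil => simp [List.zipWith3]
    | cons b bs =>
      cases l3 with
      | nil => simp [List.zipWith3]
      | cons c cs =>
        simp [List.zipWith3, ih]

theorem getElem_zipWith3 {α β γ δ : Type} (f : α → β → γ → δ) (l1 : List α) (l2 : List β) (l3 : List γ)
    (j : ℕ) (h1 : j < l1.length) (h2 : j < l2.length) (h3 : j < l3.length) :
    (List.zipWith3 f l1 l2 l3)[j]'(by rw [length_zipWith3]; omega) = f l1[j] l2[j] l3[j] := by
  induction l1 generalizing l2 l3 j with
  | nil => simp at h1
  | cons a as ih =>
    cases l2 with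
    | nil => simp at h2
    | cons b bs =>
      cases l3 with
      | nil => simp at h3
      | cons c cs =>
        cases j with
        | zero => simp [List.zipWith3]
        | succ j' =>
          simp only [List.zipWith3, List.getElem_cons_succ]
          exact ih bs cs j' (by simpa using h1) (by simpa using h2) (by simpa using h3)

theorem pack_replicate_zero (k : ℕ) : pack (List.replicate k 0) = 0 := by
  induction k with
  | zero => rfl
  | succ k ih => simp [List.replicate_succ, pack, ih]

theorem pack_append_zeros (v : List ℕ) (k : ℕ) : pack (v ++ List.replicate k 0) = pack v := by
  induction v with
  | nil => simp [pack, pack_replicate_zero]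
  | cons a v ih => simp [pack, ih]

theorem pack_zipWith3_add (a b c : List ℕ) (h1 : a.length = b.length) (h2 : b.length = c.length) :
    pack (List.zipWith3 (fun x y z => x + y + z) a b c) = pack a + pack b + pack c := by
  induction a generalizing b c with
  | nil =>
    cases b with
    | nil =>
      cases c with
      | nil => rfl
      | cons _ _ => simp at h2
    | cons _ _ => simp at h1
  | cons x xs ih =>
    cases b with
    | nil => simp at h1
    | cons y ys =>
      cases c with
      | nil => simp at h2
      | cons z zs =>
        simp only [List.zipWith3, pack]
        rw [ih ys zs (by simpa using h1) (by simpa using h2)]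
        ring

theorem length_wext (v : List ℕ) : (wext v).length = v.length + 2 := by
  unfold wext
  rw [length_zipWith3]
  simp

theorem pack_wext (v : List ℕ) : pack (wext v) = pack v * (1 + 2 ^ 64 + 2 ^ 128) := by
  unfold wext
  rw [pack_zipWith3_add _ _ _ (by simp) (by simp)]
  rw [pack_append_zeros]
  show pack v + pack (0 :: (v ++ List.replicate 1 0)) + pack (0 :: 0 :: v) = _
  have h1 : pack (0 :: (v ++ List.replicate 1 0)) = 2 ^ 64 * pack v := by
    show 0 + 2 ^ 64 * pack (v ++ List.replicate 1 0) = _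
    rw [pack_append_zeros]
    ring
  have h2 : pack (0 :: 0 :: v) = 2 ^ 128 * pack v := by
    show 0 + 2 ^ 64 * (0 + 2 ^ 64 * pack v) = _
    ring
  rw [h1, h2]
  ring

theorem getElem_wext (v : List ℕ) (j : ℕ) (hj : j < v.length + 2) :
    (wext v)[j]'(by rw [length_wext]; omega)
      = v.getD j 0 + (if j = 0 then 0 else v.getD (j - 1) 0)
        + (if 2 ≤ j then v.getD (j - 2) 0 else 0) := by
  unfold wext
  rw [getElem_zipWith3 _ _ _ _ j (by simp; omega) (by simp; omega) (by simp; omega)]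
  congr 1
  · congr 1
    · -- (v ++ [0,0])[j] = v.getD j 0
      by_cases h : j < v.length
      · rw [List.getElem_append_left h, List.getD_eq_getElem _ _ h]
      · rw [List.getElem_append_right (by omega), List.getD_eq_default _ _ (by omega)]
        rcases (show j - v.length = 0 ∨ j - v.length = 1 by omega) with h' | h' <;> simp [h']
    · -- (0 :: (v ++ [0]))[j] = if j = 0 then 0 else v.getD (j-1) 0
      cases j with
      | zero => simp
      | succ j' =>
        rw [if_neg (by omega), List.getElem_cons_succ]
        by_cases h : j' < v.length
        · rw [List.getElem_append_left h, List.getD_eq_getElem _ _ (by omega)]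
          simp
        · rw [List.getElem_append_right (by omega), List.getD_eq_default _ _ (by omega)]
          rcases (show j' - v.length = 0 by omega) with h'
          simp [h']
  · -- (0 :: 0 :: v)[j] = if 2 ≤ j then v.getD (j-2) 0 else 0
    match j, hj with
    | 0, _ => simp
    | 1, _ => simp
    | (j' + 2), hj =>
      rw [if_pos (by omega), List.getElem_cons_succ, List.getElem_cons_succ,
        List.getD_eq_getElem _ _ (by simpa using hj)]
      congr 1

theorem pack_mod (u : List ℕ) (hu : ∀ a ∈ u, a < 2 ^ 64) :
    ∀ k, pack u % 2 ^ (64 * k) = pack (u.take k) := by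
  induction u with
  | nil => intro k; simp [pack]
  | cons a u ih =>
    intro k
    cases k with
    | zero => simp [pack, Nat.mod_one]
    | succ k =>
      have ha : a < 2 ^ 64 := hu a (by simp)
      have hr : pack u % 2 ^ (64 * k) < 2 ^ (64 * k) := Nat.mod_lt _ (by positivity)
      have hsplit : pack (a :: u)
          = (a + 2 ^ 64 * (pack u % 2 ^ (64 * k))) + 2 ^ (64 * (k + 1)) * (pack u / 2 ^ (64 * k)) := by
        show a + 2 ^ 64 * pack u = _
        conv_lhs => rw [← Nat.div_add_mod (pack u) (2 ^ (64 * k))]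
        rw [show (64 * (k + 1)) = 64 + 64 * k by ring, pow_add]
        ring
      rw [hsplit, Nat.add_mul_mod_self_left]
      have hlt : a + 2 ^ 64 * (pack u % 2 ^ (64 * k)) < 2 ^ (64 * (k + 1)) := by
        rw [show (64 * (k + 1)) = 64 + 64 * k by ring, pow_add]
        calc a + 2 ^ 64 * (pack u % 2 ^ (64 * k))
            < 2 ^ 64 + 2 ^ 64 * (pack u % 2 ^ (64 * k)) := by omega
          _ = 2 ^ 64 * (1 + pack u % 2 ^ (64 * k)) := by ring
          _ ≤ 2 ^ 64 * 2 ^ (64 * k) := Nat.mul_le_mul_left _ (by omega)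
      rw [Nat.mod_eq_of_lt hlt]
      show _ = pack (a :: u.take k)
      rw [show pack (a :: u.take k) = a + 2 ^ 64 * pack (u.take k) from rfl,
        ← ih (fun x hx => hu x (by simp [hx]))]

theorem limb_pack (u : List ℕ) (hu : ∀ a ∈ u, a < 2 ^ 64) :
    ∀ j, limb (pack u) j = u.getD j 0 := by
  induction u with
  | nil => intro j; simp [pack, limb]
  | cons a u ih =>
    intro j
    have ha : a < 2 ^ 64 := hu a (by simp)
    cases j with
    | zero =>
      show (a + 2 ^ 64 * pack u) / 2 ^ (64 * 0) % 2 ^ 64 = a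
      rw [Nat.mul_zero, pow_zero, Nat.div_one, Nat.add_mul_mod_self_left, Nat.mod_eq_of_lt ha]
    | succ j =>
      have hdiv : (a + 2 ^ 64 * pack u) / 2 ^ 64 = pack u := by
        rw [Nat.add_mul_div_left _ _ (by norm_num), Nat.div_eq_of_lt ha]
        omega
      show (a + 2 ^ 64 * pack u) / 2 ^ (64 * (j + 1)) % 2 ^ 64 = (a :: u).getD (j + 1) 0
      rw [show (64 * (j + 1)) = 64 + 64 * j by ring, pow_add, ← Nat.div_div_eq_div_mul, hdiv]
      exact ih (fun x hx => hu x (by simp [hx])) j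

-- ---------- bounds: both results lie in [0, 1000000007) ----------

theorem stepVal_bounds (L : ℕ) (v : List Int) (c : ℕ) :
    0 ≤ stepVal L v c ∧ stepVal L v c < 1000000007 := by
  unfold stepVal
  dsimp only
  by_cases h2 : c + 1 < L
  · rw [if_pos h2]
    exact ⟨Int.emod_nonneg _ (by norm_num), Int.emod_lt_of_pos _ (by norm_num)⟩
  · rw [if_neg h2]
    exact ⟨Int.emod_nonneg _ (by norm_num), Int.emod_lt_of_pos _ (by norm_num)⟩

theorem rowsA_head_bounds (L : ℕ) (hL : 0 < L) (n : ℕ) :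
    0 ≤ (rowsA L n).getD 0 0 ∧ (rowsA L n).getD 0 0 < 1000000007 := by
  cases n with
  | zero =>
    have : (rowsA L 0).getD 0 0 = 1 := by
      show ((List.replicate L (0 : Int)).set 0 1).getD 0 0 = 1
      exact getD_set_self _ _ _ (by simp; omega)
    rw [this]
    norm_num
  | succ r =>
    have : (rowsA L (r + 1)).getD 0 0 = stepVal L (rowsA L r) 0 := by
      show (stepRow L (rowsA L r)).getD 0 0 = _
      unfold stepRow
      rw [getD_map_range' _ _ _ _ hL]
    rw [this]
    exact stepVal_bounds _ _ _

-- ---------- the packed loop follows A's rows mod 1000000007 ----------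

theorem cast_mod (a : Int) : ((a % (1000000007 : Int) : Int) : ZMod 1000000007) = (a : ZMod 1000000007) := by
  exact_mod_cast ZMod.intCast_mod a 1000000007

-- invariant: v is an L-limb row whose limbs are A's row s modulo 1000000007
def GoodRow (L s : ℕ) (v : List ℕ) : Prop :=
  v.length = L ∧ ∀ j, ((v.getD j 0 : Int) : ZMod 1000000007)
    = (((rowsA L s).getD j 0 : Int) : ZMod 1000000007)

theorem nextRow_length (L : ℕ) (v : List ℕ) (hv : v.length = L) :
    (nextRow L v).length = L := by
  unfold nextRow
  rw [List.length_take, List.length_tail, length_wext, hv]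
  omega

theorem nextRow_getD (L : ℕ) (v : List ℕ) (hv : v.length = L) (j : ℕ) (hj : j < L) :
    (nextRow L v).getD j 0
      = v.getD (j + 1) 0 + v.getD j 0 + (if j = 0 then 0 else v.getD (j - 1) 0) := by
  have hlen : (nextRow L v).length = L := nextRow_length L v hv
  rw [List.getD_eq_getElem _ _ (by omega)]
  unfold nextRow
  rw [List.getElem_take, List.getElem_tail]
  have := getElem_wext v (j + 1) (by omega)
  rw [this]
  rw [if_neg (by omega)]
  by_cases hj0 : j = 0
  · rw [if_neg (by omega), if_pos hj0, hj0]
  · rw [if_pos (by omega), if_neg hj0]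
    simp only [show j + 1 - 1 = j from by omega, show j + 1 - 2 = j - 1 from by omega]

theorem nextRow_bound (L : ℕ) (v : List ℕ) (hv : v.length = L) (c : ℕ) (hc : 0 < c)
    (hb : ∀ a ∈ v, a < c) : ∀ a ∈ nextRow L v, a < 3 * c := by
  have hgetD : ∀ j, v.getD j 0 < c := by
    intro j
    by_cases h : j < v.length
    · rw [List.getD_eq_getElem _ _ h]
      exact hb _ (List.getElem_mem _)
    · rw [List.getD_eq_default _ _ (by omega)]
      exact hc
  intro a ha
  obtain ⟨j, hj, rfl⟩ := List.mem_iff_getElem.mp ha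
  have hjL : j < L := by
    have := nextRow_length L v hv
    omega
  have : (nextRow L v)[j] = (nextRow L v).getD j 0 := by
    rw [List.getD_eq_getElem _ _ hj]
  rw [this, nextRow_getD L v hv j hjL]
  have h1 := hgetD (j + 1)
  have h2 := hgetD j
  have h3 := hgetD (j - 1)
  by_cases hj0 : j = 0
  · rw [if_pos hj0]; omega
  · rw [if_neg hj0]; omega

theorem cast_natMod (a : ℕ) : (((a % (1000000007 : ℕ) : ℕ) : Int) : ZMod 1000000007)
    = ((a : Int) : ZMod 1000000007) := by
  rw [Int.cast_natCast, Int.cast_natCast]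
  exact_mod_cast ZMod.natCast_mod a 1000000007

-- one packed multiplication step = one DP row step
theorem step_pack (L : ℕ) (v : List ℕ) (hv : v.length = L) (c : ℕ) (hc : 0 < c)
    (hb : ∀ a ∈ v, a < c) (hcB : 3 * c ≤ 2 ^ 64) :
    stepB L (pack v) = pack (nextRow L v) := by
  unfold stepB
  have hwb : ∀ a ∈ wext v, a < 2 ^ 64 := by
    intro a ha
    obtain ⟨j, hj, rfl⟩ := List.mem_iff_getElem.mp ha
    have hjlen : j < v.length + 2 := by
      have := length_wext v
      omega
    have hgetD : ∀ i, v.getD i 0 < c := by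
      intro i
      by_cases h : i < v.length
      · rw [List.getD_eq_getElem _ _ h]
        exact hb _ (List.getElem_mem _)
      · rw [List.getD_eq_default _ _ (by omega)]
        exact hc
    rw [getElem_wext v j hjlen]
    have h1 := hgetD j
    have h2 := hgetD (j - 1)
    have h3 := hgetD (j - 2)
    by_cases hj0 : j = 0
    · rw [if_pos hj0, if_neg (by omega)]; omega
    · by_cases hj2 : 2 ≤ j
      · rw [if_neg hj0, if_pos hj2]; omega
      · rw [if_neg hj0, if_neg hj2]; omega
  rw [← pack_wext]
  have hlw : (wext v).length = v.length + 2 := length_wext v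
  obtain ⟨w0, ws, hw⟩ : ∃ w0 ws, wext v = w0 :: ws := by
    cases hwx : wext v with
    | nil => rw [hwx] at hlw; simp at hlw
    | cons w0 ws => exact ⟨w0, ws, rfl⟩
  have hw0 : w0 < 2 ^ 64 := hwb w0 (by rw [hw]; simp)
  have hdiv : pack (wext v) / 2 ^ 64 = pack ws := by
    rw [hw]
    show (w0 + 2 ^ 64 * pack ws) / 2 ^ 64 = pack ws
    rw [Nat.add_mul_div_left _ _ (by norm_num), Nat.div_eq_of_lt hw0]
    omega
  rw [hdiv, pack_mod ws (fun a ha => hwb a (by rw [hw]; simp [ha])) L]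
  unfold nextRow
  rw [hw]
  rfl

-- the inner 'for _ in range(t)' of up-to-20 multiplications
theorem chunk_pack (L s : ℕ) (v : List ℕ) (hG : GoodRow L s v) (hb : ∀ a ∈ v, a < 1000000007) :
    ∀ t, t ≤ 20 → ∃ v', (List.range t).foldl (fun r _ => stepB L r) (pack v) = pack v'
      ∧ GoodRow L (s + t) v' ∧ ∀ a ∈ v', a < 3 ^ t * 1000000007 := by
  intro t
  induction t with
  | zero =>
    intro _
    exact ⟨v, by rw [List.range_zero, List.foldl_nil], hG, by simpa using hb⟩
  | succ t ih =>
    intro ht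
    obtain ⟨v1, hfold, hG1, hb1⟩ := ih (by omega)
    refine ⟨nextRow L v1, ?_, ?_, ?_⟩
    · rw [List.range_succ, List.foldl_append, hfold, List.foldl_cons, List.foldl_nil]
      exact step_pack L v1 hG1.1 (3 ^ t * 1000000007) (by positivity) hb1 (by
        calc 3 * (3 ^ t * 1000000007) = 3 ^ (t + 1) * 1000000007 := by ring
          _ ≤ 3 ^ 20 * 1000000007 :=
            Nat.mul_le_mul_right _ (Nat.pow_le_pow_right (by norm_num) (by omega))
          _ ≤ 2 ^ 64 := by norm_num)
    · obtain ⟨hlen1, hcong1⟩ := hG1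
      have hcong1' : ∀ j, ((v1.getD j 0 : ℕ) : ZMod 1000000007)
          = (((rowsA L (s + t)).getD j 0 : Int) : ZMod 1000000007) := by
        intro j
        have := hcong1 j
        push_cast at this ⊢
        exact this
      refine ⟨nextRow_length L v1 hlen1, ?_⟩
      intro j
      by_cases hj : j < L
      · rw [nextRow_getD L v1 hlen1 j hj]
        have hstep : (rowsA L (s + t + 1)).getD j 0 = stepVal L (rowsA L (s + t)) j := by
          show (stepRow L (rowsA L (s + t))).getD j 0 = _
          unfold stepRow
          rw [getD_map_range' _ _ _ _ hj]
        rw [show s + (t + 1) = s + t + 1 by ring, hstep, stepVal_eq, cast_mod]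
        push_cast
        rw [hcong1' (j + 1), hcong1' j]
        by_cases hj0 : j = 0
        · rw [if_pos hj0, if_pos hj0]
          by_cases hj1 : j + 1 < L
          · rw [if_pos hj1]
            ring
          · rw [if_neg hj1, List.getD_eq_default _ _ (by rw [rowsA_length]; omega)]
            push_cast
            ring
        · rw [if_neg hj0, if_neg hj0, hcong1' (j - 1)]
          by_cases hj1 : j + 1 < L
          · rw [if_pos hj1]
            ring
          · rw [if_neg hj1, List.getD_eq_default (rowsA L (s + t)) _ (by rw [rowsA_length]; omega)]
            push_cast
            ring
      · rw [List.getD_eq_default _ _ (by rw [nextRow_length L v1 hlen1]; omega),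
          List.getD_eq_default _ _ (by rw [rowsA_length]; omega)]
        push_cast
        ring
    · intro a ha
      have h := nextRow_bound L v1 hG1.1 _ (by positivity) hb1 a ha
      exact lt_of_lt_of_eq h (by ring)

-- the divide-and-conquer repack computes `pack`
theorem pack_append (u w : List ℕ) : pack (u ++ w) = pack u + 2 ^ (64 * u.length) * pack w := by
  induction u with
  | nil => simp [pack]
  | cons a u ih =>
    show a + 2 ^ 64 * pack (u ++ w) = a + 2 ^ 64 * pack u + 2 ^ (64 * (u.length + 1)) * pack w
    rw [ih, show 64 * (u.length + 1) = 64 + 64 * u.length by ring, pow_add]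
    ring

theorem packDC_eq (v : List ℕ) : packDC v = pack v := by
  induction hn : v.length using Nat.strong_induction_on generalizing v with
  | _ n ih =>
    rw [packDC]
    by_cases h1 : v.length ≤ 1
    · rw [if_pos h1]
      cases v with
      | nil => rfl
      | cons a u =>
        cases u with
        | nil =>
          show a = a + 2 ^ 64 * pack []
          show a = a + 2 ^ 64 * 0
          ring
        | cons b w => simp at h1
    · rw [if_neg h1]
      dsimp only
      have ht : (v.take (v.length / 2)).length = v.length / 2 := by
        rw [List.length_take]
        omega
      have hd : (v.drop (v.length / 2)).length = v.length - v.length / 2 := by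
        rw [List.length_drop]
      rw [ih _ (by omega) _ ht, ih _ (by omega) _ hd]
      conv_rhs => rw [← List.take_append_drop (v.length / 2) v]
      rw [pack_append, ht]

-- the divide-and-conquer unpack computes the base-2^64 digits
theorem limb_mod (x h j : ℕ) (hj : j < h) : limb (x % 2 ^ (64 * h)) j = limb x j := by
  unfold limb
  rw [show (2 : ℕ) ^ (64 * h) = 2 ^ (64 * j) * 2 ^ (64 * (h - j)) by rw [← pow_add]; congr 1; omega,
    Nat.mod_mul_right_div_self,
    Nat.mod_mod_of_dvd _ (pow_dvd_pow 2 (by omega))]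

theorem limb_div (x h j : ℕ) : limb (x / 2 ^ (64 * h)) j = limb x (h + j) := by
  unfold limb
  rw [Nat.div_div_eq_div_mul, ← pow_add]
  congr 2
  ring

theorem limbsDC_eq (L : ℕ) : ∀ x, limbsDC L x = (List.range L).map (limb x) := by
  induction L using Nat.strong_induction_on with
  | _ L ih =>
    intro x
    rw [limbsDC]
    by_cases h0 : L = 0
    · rw [if_pos h0, h0]
      rfl
    · rw [if_neg h0]
      by_cases h1 : L = 1
      · rw [if_pos h1, h1]
        have : limb x 0 = x % 2 ^ 64 := by
          unfold limb
          rw [Nat.mul_zero, pow_zero, Nat.div_one]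
        rw [show (List.range 1).map (limb x) = [limb x 0] from rfl, this]
      · rw [if_neg h1]
        dsimp only
        rw [ih (L / 2) (by omega), ih (L - L / 2) (by omega)]
        have hsplit : List.range L
            = List.range (L / 2) ++ (List.range (L - L / 2)).map (fun x => L / 2 + x) := by
          conv_lhs => rw [show L = L / 2 + (L - L / 2) by omega]
          exact List.range_add
        rw [hsplit, List.map_append, List.map_map]
        congr 1
        · refine List.map_congr_left (fun j hj => ?_)
          exact limb_mod x (L / 2) j (List.mem_range.mp hj)
        · refine List.map_congr_left (fun j _ => ?_)
          exact limb_div x (L / 2) j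

theorem reduce_pack (L s : ℕ) (u : List ℕ) (hG : GoodRow L s u) (hu : ∀ a ∈ u, a < 2 ^ 64) :
    ∃ v', redB L (pack u) = pack v'
      ∧ GoodRow L s v' ∧ ∀ a ∈ v', a < 1000000007 := by
  refine ⟨(List.range L).map (fun j => u.getD j 0 % 1000000007), ?_, ⟨by simp, ?_⟩, ?_⟩
  · unfold redB
    rw [limbsDC_eq, packDC_eq, List.map_map]
    congr 1
    refine List.map_congr_left (fun j _ => ?_)
    show limb (pack u) j % (10 ^ 9 + 7) = u.getD j 0 % 1000000007
    rw [limb_pack u hu j]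
    norm_num
  · intro j
    by_cases hj : j < L
    · rw [getD_map_range' _ _ _ _ hj, cast_natMod]
      exact hG.2 j
    · rw [List.getD_eq_default _ _ (by simp; omega),
        List.getD_eq_default _ _ (by rw [rowsA_length]; omega)]
      push_cast
      ring
  · intro a ha
    obtain ⟨j, _, rfl⟩ := List.mem_map.mp ha
    exact Nat.mod_lt _ (by norm_num)

-- the whole while-loop
theorem loopB_pack (L : ℕ) : ∀ rem s v, GoodRow L s v → (∀ a ∈ v, a < 1000000007) →
    ∃ v', loopB L rem (pack v) = pack v' ∧ GoodRow L (s + rem) v' ∧ ∀ a ∈ v', a < 1000000007 := by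
  intro rem
  induction rem using Nat.strong_induction_on with
  | _ rem ih =>
    intro s v hG hb
    rcases eq_or_ne rem 0 with rfl | hrem
    · rw [loopB, dif_pos rfl]
      exact ⟨v, rfl, hG, hb⟩
    · rw [loopB, dif_neg hrem]
      dsimp only
      obtain ⟨v1, hfold, hG1, hb1⟩ := chunk_pack L s v hG hb (min 20 rem) (by omega)
      rw [hfold]
      have hu1 : ∀ a ∈ v1, a < 2 ^ 64 := by
        intro a ha
        have := hb1 a ha
        calc a < 3 ^ (min 20 rem) * 1000000007 := this
          _ ≤ 3 ^ 20 * 1000000007 :=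
            Nat.mul_le_mul_right _ (Nat.pow_le_pow_right (by norm_num) (by omega))
          _ ≤ 2 ^ 64 := by norm_num
      obtain ⟨v2, hred, hG2, hb2⟩ := reduce_pack L (s + min 20 rem) v1 hG1 hu1
      rw [hred]
      obtain ⟨v', hloop, hG', hb'⟩ := ih (rem - min 20 rem) (by omega) (s + min 20 rem) v2 hG2 hb2
      rw [hloop]
      exact ⟨v', rfl, by rwa [show s + min 20 rem + (rem - min 20 rem) = s + rem by omega] at hG', hb'⟩

theorem int_eq_of_cast_eq (a b : Int) (ha0 : 0 ≤ a) (ha1 : a < 1000000007)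
    (hb0 : 0 ≤ b) (hb1 : b < 1000000007)
    (h : (a : ZMod 1000000007) = (b : ZMod 1000000007)) : a = b := by
  have hm : a % (1000000007 : ℕ) = b % (1000000007 : ℕ) := (ZMod.intCast_eq_intCast_iff a b 1000000007).mp h
  have h1 : a % ((1000000007 : ℕ) : Int) = a := Int.emod_eq_of_lt ha0 (by exact_mod_cast ha1)
  have h2 : b % ((1000000007 : ℕ) : Int) = b := Int.emod_eq_of_lt hb0 (by exact_mod_cast hb1)
  rw [h1, h2] at hm
  exact hm

-- ===== VERDICT (by name: the statement is the Claim_ definition above) =====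
theorem solve_spec : Claim_equal_solve := by
  intro length N _ hpre
  obtain ⟨h1, h2⟩ := hpre
  unfold Spec_solve
  have hL : 0 < length.toNat := by omega
  set L := length.toNat with hLdef
  set n := N.toNat with hndef
  -- the initial packed row 1 = pack (1 :: 0 ... 0)
  have hpack1 : pack (1 :: List.replicate (L - 1) 0) = 1 := by
    show 1 + 2 ^ 64 * pack (List.replicate (L - 1) 0) = 1
    rw [pack_replicate_zero]
    ring
  have hG0 : GoodRow L 0 (1 :: List.replicate (L - 1) 0) := by
    constructor
    · simp
      omega
    · intro j
      have hrow0 : (rowsA L 0).getD j 0 = if j = 0 then 1 else 0 := by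
        show ((List.replicate L (0 : Int)).set 0 1).getD j 0 = _
        rcases eq_or_ne j 0 with rfl | hj
        · rw [if_pos rfl]
          exact getD_set_self _ _ _ (by simp; omega)
        · rw [if_neg hj]
          by_cases hjL : j < L
          · rw [List.getD_eq_getElem _ _ (by simpa using hjL), List.getElem_set_ne (by omega)]
            simp
          · rw [List.getD_eq_default _ _ (by simpa using hjL)]
      rw [hrow0]
      rcases eq_or_ne j 0 with rfl | hj
      · rw [if_pos rfl]
        norm_num
      · rw [if_neg hj]
        cases j with
        | zero => omega
        | succ j' =>
          show (((List.replicate (L - 1) (0 : ℕ)).getD j' 0 : Int) : ZMod 1000000007) = _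
          have hz : (List.replicate (L - 1) (0 : ℕ)).getD j' 0 = 0 := by
            by_cases h : j' < L - 1
            · rw [List.getD_eq_getElem _ _ (by simpa using h)]
              simp
            · rw [List.getD_eq_default _ _ (by simpa using h)]
          rw [hz]
          push_cast
          ring
  have hb0 : ∀ a ∈ (1 :: List.replicate (L - 1) 0), a < 1000000007 := by
    intro a ha
    rcases List.mem_cons.mp ha with rfl | ha
    · norm_num
    · rw [List.eq_of_mem_replicate ha]
      norm_num
  obtain ⟨v', hloop, hG', hb'⟩ := loopB_pack L n 0 _ hG0 hb0
  have hBshow : solve_alt length N = ((loopB L n 1 % 2 ^ 64 : ℕ) : Int) := rfl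
  rw [solve_eq_rows length N h1 h2, hBshow, ← hpack1, hloop]
  have hv'64 : ∀ a ∈ v', a < 2 ^ 64 := fun a ha => lt_trans (hb' a ha) (by norm_num)
  have hlimb0 : pack v' % 2 ^ 64 = v'.getD 0 0 := by
    have : pack v' % 2 ^ 64 = limb (pack v') 0 := by
      unfold limb
      norm_num
    rw [this, limb_pack v' hv'64 0]
  rw [hlimb0]
  obtain ⟨ha0, ha1⟩ := rowsA_head_bounds L hL n
  have hb0' : v'.getD 0 0 < 1000000007 := by
    by_cases h : 0 < v'.length
    · rw [List.getD_eq_getElem _ _ h]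
      exact hb' _ (List.getElem_mem _)
    · rw [List.getD_eq_default _ _ (by omega)]
      norm_num
  refine (int_eq_of_cast_eq _ _ (by positivity) (by exact_mod_cast hb0') ha0 ha1 ?_).symm
  have := hG'.2 0
  simpa using this
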